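-- pv_equiv track=rewrite | github.com/alexfariac/duycycle | schedule.py | torus
-- ===== SOURCE A (Python) =====
-- def torus(lines,columns, upLine = 0, upColumn = 0):
-- 	if(lines <= 0 or columns <= 0 or upColumn > columns):
-- 		raise Exception ("Array invalid offset for line os columns")
-- 	else:
-- 		matrix = [[1 if ( (lin == upLine and col < (columns//2)+1) or col == upColumn) else 0 for col in range(columns)] for lin in range(lines)]
-- 		schedule = []
-- 		for line in matrix:
-- 			schedule += line
-- 		return schedule
-- ===== SOURCE B (Python) =====
-- def torus(lines, columns, upLine=0, upColumn=0):
--     if lines <= 0 or columns <= 0 or upColumn > columns: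
--         raise Exception("Array invalid offset for line os columns")
--     schedule = [0] * (lines * columns)
--     if 0 <= upColumn < columns:
--         for row in range(lines):
--             schedule[row * columns + upColumn] = 1
--     if 0 <= upLine < lines:
--         for col in range(columns // 2 + 1):
--             schedule[upLine * columns + col] = 1
--     return schedule
-- ===== Notes on version B (the rewrite author's own statement) =====
-- stated objective: alternative
-- what changed: B allocates one flat [0]*(lines*columns) buffer and writes the marked cells directly (one loop per stripe: the upColumn column, the first columns//2+1 cells of row upLine), instead of A's nested per-cell comprehension building a 2D matrix that is then flattened by repeated list concatenation.
import Mathlib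
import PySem

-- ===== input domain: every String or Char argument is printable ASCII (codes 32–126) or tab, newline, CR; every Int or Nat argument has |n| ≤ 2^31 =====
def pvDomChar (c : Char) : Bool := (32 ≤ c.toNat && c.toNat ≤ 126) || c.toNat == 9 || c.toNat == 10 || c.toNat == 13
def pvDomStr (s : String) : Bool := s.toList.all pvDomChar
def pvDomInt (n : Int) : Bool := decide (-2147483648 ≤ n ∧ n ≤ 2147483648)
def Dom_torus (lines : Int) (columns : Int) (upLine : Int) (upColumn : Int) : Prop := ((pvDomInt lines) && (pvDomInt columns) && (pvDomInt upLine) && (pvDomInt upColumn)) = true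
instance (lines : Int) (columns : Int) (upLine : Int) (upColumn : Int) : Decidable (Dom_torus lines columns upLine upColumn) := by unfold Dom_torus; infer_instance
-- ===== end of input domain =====

-- B builds the schedule as one flat buffer and writes only the marked cells (the upColumn column
-- and the first columns//2+1 cells of row upLine), instead of A's per-cell 2D comprehension
-- flattened by repeated concatenation; equal return value proved on all inputs where A returns.

-- ===== PORT A =====
def torus (lines : Int) (columns : Int) (upLine : Int) (upColumn : Int) : List Int :=
  if lines ≤ 0 ∨ columns ≤ 0 ∨ upColumn > columns then []  -- Python raises here; excluded by Pre_torus
  else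
    let matrix : List (List Int) :=
      (PySem.List.pyRange 0 lines 1).map (fun lin =>
        (PySem.List.pyRange 0 columns 1).map (fun col =>
          if (lin = upLine ∧ col < PySem.Int.floordiv columns 2 + 1) ∨ col = upColumn then 1 else 0))
    matrix.foldl (fun schedule line => schedule ++ line) []

-- ===== PORT B =====
def torus_alt (lines : Int) (columns : Int) (upLine : Int) (upColumn : Int) : List Int :=
  if lines ≤ 0 ∨ columns ≤ 0 ∨ upColumn > columns then []  -- Python raises here; excluded by Pre_torus
  else
    -- schedule = [0] * (lines * columns)   (lines*columns > 0 here, so .toNat is exact)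
    let s0 : List Int := List.replicate (lines * columns).toNat 0
    -- if 0 <= upColumn < columns: for row in range(lines): schedule[row*columns + upColumn] = 1
    let s1 : List Int :=
      if 0 ≤ upColumn ∧ upColumn < columns then
        (PySem.List.pyRange 0 lines 1).foldl
          (fun s row => PySem.List.pySetD s (row * columns + upColumn) 1) s0
      else s0
    -- if 0 <= upLine < lines: for col in range(columns//2 + 1): schedule[upLine*columns + col] = 1
    if 0 ≤ upLine ∧ upLine < lines then
      (PySem.List.pyRange 0 (PySem.Int.floordiv columns 2 + 1) 1).foldl
        (fun s col => PySem.List.pySetD s (upLine * columns + col) 1) s1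
    else s1

-- ===== PRECONDITION & SPEC =====
-- Pre_torus excludes exactly the inputs on which the Python A raises its explicit Exception.
def Pre_torus (lines : Int) (columns : Int) (upLine : Int) (upColumn : Int) : Prop :=
  0 < lines ∧ 0 < columns ∧ upColumn ≤ columns
instance (lines : Int) (columns : Int) (upLine : Int) (upColumn : Int) : Decidable (Pre_torus lines columns upLine upColumn) := by unfold Pre_torus; infer_instance
def pvWitness_torus : Int × Int × Int × Int := (2, 3, 0, 1)

def Spec_torus (lines : Int) (columns : Int) (upLine : Int) (upColumn : Int) (out : List Int) : Prop := out = torus_alt lines columns upLine upColumn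
instance (lines : Int) (columns : Int) (upLine : Int) (upColumn : Int) (out : List Int) : Decidable (Spec_torus lines columns upLine upColumn out) := by unfold Spec_torus; infer_instance

-- ===== CLAIM (what is proved, stated in full; the proofs are below) =====
def Claim_equal_torus : Prop := ∀ (lines : Int) (columns : Int) (upLine : Int) (upColumn : Int), Dom_torus lines columns upLine upColumn → Pre_torus lines columns upLine upColumn → Spec_torus lines columns upLine upColumn (torus lines columns upLine upColumn)

-- ===== LEMMAS AND PROOFS =====

/-- Element view of a left fold of `set … 1` over a list of indices. -/
lemma foldl_set_getElem? (I : List Nat) (s : List Int) (j : Nat) :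
    (I.foldl (fun s i => s.set i (1:Int)) s)[j]? =
      if j ∈ I ∧ j < s.length then some 1 else s[j]? := by
  induction I generalizing s with
  | nil => simp
  | cons i I ih =>
    rw [List.foldl_cons, ih, List.length_set, List.getElem?_set]
    simp only [List.mem_cons]
    by_cases h2 : j < s.length
    · by_cases h1 : j ∈ I
      · simp [h1, h2]
      · by_cases h3 : i = j
        · subst h3; simp [h1, h2]
        · simp only [List.getElem?_eq_getElem h2, h3, if_false]
          simp [h1, h2, Ne.symm h3]
    · have hn : s[j]? = none := List.getElem?_eq_none (by omega)
      by_cases h3 : i = j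
      · subst h3; simp [h2]
      · simp [h2, Ne.symm h3]
        intro h; exact absurd h h3

lemma foldl_set_length (I : List Nat) (s : List Int) :
    (I.foldl (fun s i => s.set i (1:Int)) s).length = s.length := by
  induction I generalizing s <;> simp_all

/-- Flattening equal-length rows is indexing by `(j / C, j % C)`. -/
lemma flat_rows (L C : Nat) (e : Nat → Nat → Int) :
    (List.range L).flatMap (fun lin => (List.range C).map (e lin))
      = (List.range (L * C)).map (fun j => e (j / C) (j % C)) := by
  induction L with
  | zero => simp
  | succ L ih =>
    rw [List.range_succ, Nat.succ_mul, List.range_add]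
    simp only [List.flatMap_append, ih, List.map_append, List.map_map, List.flatMap_singleton]
    congr 1
    apply List.map_congr_left
    intro k hk
    have hkC : k < C := List.mem_range.mp hk
    have hC : 0 < C := by omega
    simp only [Function.comp, Nat.add_comm (L*C) k]
    have h1 : (k + L * C) / C = L := by
      rw [Nat.add_mul_div_right _ _ hC, Nat.div_eq_of_lt hkC]; omega
    have h2 : (k + L * C) % C = k := by
      rw [Nat.add_mul_mod_self_right, Nat.mod_eq_of_lt hkC]
    rw [h1, h2]

lemma mem_col_idx {L C uc j : Nat} (huc : uc < C) :
    j ∈ (List.range L).map (fun r => r * C + uc) ↔ j < L * C ∧ j % C = uc := by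
  simp only [List.mem_map, List.mem_range]
  constructor
  · rintro ⟨r, hr, rfl⟩
    refine ⟨?_, by rw [Nat.mul_add_mod', Nat.mod_eq_of_lt huc]⟩
    calc r * C + uc < r * C + C := by omega
      _ = (r + 1) * C := by ring
      _ ≤ L * C := Nat.mul_le_mul_right _ (by omega)
  · rintro ⟨hj, hmod⟩
    have hC : 0 < C := by omega
    have h1 := Nat.div_add_mod j C
    have h2 : j / C * C = C * (j / C) := Nat.mul_comm _ _
    have h3 : j / C < L := by rw [Nat.div_lt_iff_lt_mul hC]; exact hj
    exact ⟨j / C, h3, by omega⟩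

lemma mem_row_idx {C ul h j : Nat} (hh : h ≤ C) (hC : 0 < C) :
    j ∈ (List.range h).map (fun c => ul * C + c) ↔ j / C = ul ∧ j % C < h := by
  simp only [List.mem_map, List.mem_range]
  constructor
  · rintro ⟨c, hc, rfl⟩
    have hcC : c < C := by omega
    constructor
    · rw [Nat.mul_comm ul C, Nat.mul_add_div hC, Nat.div_eq_of_lt hcC]; omega
    · rw [Nat.mul_add_mod', Nat.mod_eq_of_lt hcC]; exact hc
  · rintro ⟨hdiv, hmod⟩
    have h1 := Nat.div_add_mod j C
    have h3 : C * (j / C) = ul * C := by rw [hdiv, Nat.mul_comm]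
    exact ⟨j % C, hmod, by omega⟩

/-- A fold of Python `schedule[idx r] = 1` over `range n` is a fold of `set` over the Nat indices. -/
lemma foldl_pySetD_toSet (n : Nat) (g : Nat → Nat) (s : List Int)
    (idx : Nat → Int) (hidx : ∀ r, idx r = ↑(g r)) :
    List.foldl (fun x y => PySem.List.pySetD x (idx y) 1) s (List.range n)
      = List.foldl (fun s i => s.set i (1:Int)) s ((List.range n).map g) := by
  rw [List.foldl_map]
  exact PySem.List.foldl_congr_mem _ _ _ _ (fun acc x _ => by rw [hidx, PySem.List.pySetD_natCast])

theorem torus_spec : Claim_equal_torus := by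
  intro lines columns upLine upColumn _ hpre
  obtain ⟨hl, hc, huc⟩ := hpre
  show torus lines columns upLine upColumn = torus_alt lines columns upLine upColumn
  lift lines to ℕ using hl.le with L
  lift columns to ℕ using hc.le with C
  have hLpos : 0 < L := by exact_mod_cast hl
  have hCpos : 0 < C := by exact_mod_cast hc
  have hg : ¬((L:Int) ≤ 0 ∨ (C:Int) ≤ 0 ∨ upColumn > (C:Int)) := by
    push Not; exact ⟨by exact_mod_cast hLpos, by exact_mod_cast hCpos, huc⟩
  rw [torus, torus_alt, if_neg hg, if_neg hg]
  have hfd : PySem.Int.floordiv (C:Int) 2 = ((C/2 : Nat) : Int) := by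
    exact_mod_cast PySem.Int.floordiv_natCast C 2
  rw [PySem.List.foldl_append_eq_flatMap (fun line : List Int => line)]
  dsimp only
  simp only [List.nil_append, hfd]
  have hcast : ((C/2:Nat):Int) + 1 = ((C/2+1 : Nat):Int) := by push_cast; ring
  rw [hcast]
  simp only [PySem.List.pyRange_zero_nat, List.flatMap_map, List.map_map, List.foldl_map]
  have hrep : ((L:Int) * (C:Int)).toNat = L * C := by rw [← Nat.cast_mul, Int.toNat_natCast]
  rw [hrep]
  simp only [Function.comp]
  rw [flat_rows L C]
  set h : Nat := C / 2 + 1 with hhdef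
  have hhC : h ≤ C := by omega
  by_cases g1 : 0 ≤ upColumn ∧ upColumn < (C:Int)
  · obtain ⟨uc, rfl⟩ := Int.eq_ofNat_of_zero_le g1.1
    have hucC : uc < C := by exact_mod_cast g1.2
    rw [if_pos g1, foldl_pySetD_toSet L (fun r => r * C + uc) _ _ (by intro r; push_cast; ring)]
    by_cases g2 : 0 ≤ upLine ∧ upLine < (L:Int)
    · obtain ⟨ul, rfl⟩ := Int.eq_ofNat_of_zero_le g2.1
      have hulL : ul < L := by exact_mod_cast g2.2
      rw [if_pos g2, foldl_pySetD_toSet h (fun c => ul * C + c) _ _ (by intro c; push_cast; ring)]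
      apply List.ext_getElem?
      intro j
      rw [foldl_set_getElem?, foldl_set_getElem?]
      simp only [foldl_set_length, List.length_replicate, List.getElem?_map,
        List.getElem?_replicate, mem_col_idx hucC, mem_row_idx hhC hCpos]
      by_cases hj : j < L * C
      · rw [List.getElem?_range hj]
        simp only [Option.map_some, Function.comp, Nat.cast_inj, Nat.cast_lt]
        by_cases hA : j / C = ul ∧ j % C < h <;> by_cases hB : j % C = uc <;>
          simp [hj, hA, hB]
      · rw [List.getElem?_eq_none (by simpa using Nat.not_lt.mp hj)]
        simp [hj]
    · rw [if_neg g2]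
      push Not at g2
      apply List.ext_getElem?
      intro j
      rw [foldl_set_getElem?]
      simp only [List.length_replicate, List.getElem?_map,
        List.getElem?_replicate, mem_col_idx hucC]
      by_cases hj : j < L * C
      · have hline : ((j / C : Nat) : Int) ≠ upLine := by
          intro he
          have h0 : (0:Int) ≤ upLine := he ▸ by positivity
          have h1 : j / C < L := by rw [Nat.div_lt_iff_lt_mul hCpos]; exact hj
          have h2 := g2 h0
          rw [← he] at h2
          exact absurd h2 (by exact_mod_cast Nat.not_le.mpr h1)
        rw [List.getElem?_range hj]
        simp only [Option.map_some, Function.comp, Nat.cast_inj, Nat.cast_lt, hline, false_and,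
          false_or]
        by_cases hB : j % C = uc <;> simp [hj, hB]
      · rw [List.getElem?_eq_none (by simpa using Nat.not_lt.mp hj)]
        simp [hj]
  · rw [if_neg g1]
    push Not at g1
    have hcol : ∀ j : Nat, j < L * C → ((j % C : Nat) : Int) ≠ upColumn := by
      intro j _ he
      have h0 : (0:Int) ≤ upColumn := he ▸ by positivity
      have h2 := g1 h0
      rw [← he] at h2
      exact absurd h2 (by exact_mod_cast Nat.not_le.mpr (Nat.mod_lt j hCpos))
    by_cases g2 : 0 ≤ upLine ∧ upLine < (L:Int)
    · obtain ⟨ul, rfl⟩ := Int.eq_ofNat_of_zero_le g2.1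
      rw [if_pos g2, foldl_pySetD_toSet h (fun c => ul * C + c) _ _ (by intro c; push_cast; ring)]
      apply List.ext_getElem?
      intro j
      rw [foldl_set_getElem?]
      simp only [List.length_replicate, List.getElem?_map,
        List.getElem?_replicate, mem_row_idx hhC hCpos]
      by_cases hj : j < L * C
      · rw [List.getElem?_range hj]
        simp only [Option.map_some, Function.comp, Nat.cast_inj, Nat.cast_lt, hcol j hj, or_false]
        by_cases hA : j / C = ul ∧ j % C < h <;> simp [hj, hA]
      · rw [List.getElem?_eq_none (by simpa using Nat.not_lt.mp hj)]
        simp [hj]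
    · rw [if_neg g2]
      push Not at g2
      apply List.ext_getElem?
      intro j
      simp only [List.getElem?_map, List.getElem?_replicate]
      by_cases hj : j < L * C
      · have hline : ((j / C : Nat) : Int) ≠ upLine := by
          intro he
          have h0 : (0:Int) ≤ upLine := he ▸ by positivity
          have h1 : j / C < L := by rw [Nat.div_lt_iff_lt_mul hCpos]; exact hj
          have h2 := g2 h0
          rw [← he] at h2
          exact absurd h2 (by exact_mod_cast Nat.not_le.mpr h1)
        rw [List.getElem?_range hj]
        simp only [Option.map_some, Function.comp, hline, hcol j hj, false_and, or_false]
        simp [hj]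
      · rw [List.getElem?_eq_none (by simpa using Nat.not_lt.mp hj)]
        simp [hj]

-- ===== VERDICT (by name: the statement is the Claim_ definition above) =====
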